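-- pv_equiv track=rewrite | github.com/kxwhiowo/COMP3270 | assignment2-code/p6.py | check_nearest_food_position
-- ===== SOURCE A (Python) =====
-- def check_nearest_food_position(map, player_position):
--     food_positions = []
--     for i in range(len(map)):
--         for j in range(len(map[i])):
--             if map[i][j] == '.':
--                 food_positions.append((i, j))
--     value = 100000
--     if len(food_positions) == 0:
--         return 0
--     for points in food_positions:
--         dist = abs(points[0] - player_position[0]) + abs(points[1] - player_position[1])
--         if dist < value:
--             value = dist
--
--     return value
-- ===== SOURCE B (Python) =====
-- def check_nearest_food_position(map, player_position):
--     px, py = player_position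
--     best = 100000
--     found = False
--     for i, row in enumerate(map):
--         if abs(i - px) >= best:
--             # this whole row cannot beat the current best: any food here has
--             # distance >= |i-px| >= best; only record whether food exists at all
--             if '.' in row:
--                 found = True
--             continue
--         for j, cell in enumerate(row):
--             if cell == '.':
--                 found = True
--                 d = abs(i - px) + abs(j - py)
--                 if d < best:
--                     best = d
--     return best if found else 0
-- ===== Notes on version B (the rewrite author's own statement) =====
-- stated objective: alternative
-- what changed: Replaces A's collect-all-food-positions-then-minimize structure with a branch-and-bound scan that keeps a running best and prunes whole rows whose row distance |i-px| already cannot beat it (doing only a cheap membership test there to track whether food exists), so pruned rows are never distance-scanned.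
import Mathlib
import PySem

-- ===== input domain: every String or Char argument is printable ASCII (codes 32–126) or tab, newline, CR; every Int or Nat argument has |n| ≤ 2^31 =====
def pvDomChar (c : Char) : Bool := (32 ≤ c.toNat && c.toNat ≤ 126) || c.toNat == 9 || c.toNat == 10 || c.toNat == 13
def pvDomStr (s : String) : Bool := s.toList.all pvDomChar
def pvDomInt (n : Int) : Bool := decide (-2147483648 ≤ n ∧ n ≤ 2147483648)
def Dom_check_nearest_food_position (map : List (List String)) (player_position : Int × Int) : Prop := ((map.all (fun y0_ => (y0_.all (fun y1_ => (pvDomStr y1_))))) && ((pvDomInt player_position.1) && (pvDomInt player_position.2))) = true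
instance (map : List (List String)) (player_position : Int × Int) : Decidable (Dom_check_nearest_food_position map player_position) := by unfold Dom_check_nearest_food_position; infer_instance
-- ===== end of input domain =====

-- B replaces A's collect-then-minimize structure by a branch-and-bound scan with a running best
-- that skips whole rows which cannot improve it (objective: alternative).

-- ===== PORT A =====
def check_nearest_food_position (map : List (List String)) (player_position : Int × Int) : Int :=
  let food_positions : List (Int × Int) :=
    (PySem.List.pyRange 0 (map.length : Int) 1).foldl
      (fun acc i =>
        (PySem.List.pyRange 0 ((PySem.List.pyGetD map i []).length : Int) 1).foldl
          (fun acc2 j =>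
            if PySem.List.pyGetD (PySem.List.pyGetD map i []) j "" == "." then acc2 ++ [(i, j)]
            else acc2) acc) []
  if food_positions.length = 0 then 0
  else
    food_positions.foldl
      (fun value points =>
        let dist := |points.1 - player_position.1| + |points.2 - player_position.2|
        if dist < value then dist else value) 100000

-- ===== PORT B =====
def check_nearest_food_position_alt (map : List (List String)) (player_position : Int × Int) : Int :=
  let s : Int × Bool :=
    (PySem.List.enumerate map 0).foldl
      (fun s ir =>
        if |ir.1 - player_position.1| ≥ s.1 then
          (s.1, s.2 || ir.2.contains ".")
        else
          (PySem.List.enumerate ir.2 0).foldl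
            (fun t jc =>
              if jc.2 == "." then
                let d := |ir.1 - player_position.1| + |jc.1 - player_position.2|
                (if d < t.1 then d else t.1, true)
              else t) s)
      ((100000 : Int), false)
  if s.2 then s.1 else 0

-- ===== PRECONDITION & SPEC =====
def Spec_check_nearest_food_position (map : List (List String)) (player_position : Int × Int) (out : Int) : Prop := out = check_nearest_food_position_alt map player_position
instance (map : List (List String)) (player_position : Int × Int) (out : Int) : Decidable (Spec_check_nearest_food_position map player_position out) := by unfold Spec_check_nearest_food_position; infer_instance

-- ===== CLAIM (what is proved, stated in full; the proofs are below) =====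
def Claim_equal_check_nearest_food_position : Prop := ∀ (map : List (List String)) (player_position : Int × Int), Dom_check_nearest_food_position map player_position → Spec_check_nearest_food_position map player_position (check_nearest_food_position map player_position)

-- ===== LEMMAS AND PROOFS =====

-- A's food_positions list is the flat list of coordinates of '.'-cells, in row-major order.
theorem foods_eq (map : List (List String)) :
    (PySem.List.pyRange 0 (map.length : Int) 1).foldl
      (fun acc i =>
        (PySem.List.pyRange 0 ((PySem.List.pyGetD map i []).length : Int) 1).foldl
          (fun acc2 j =>
            if PySem.List.pyGetD (PySem.List.pyGetD map i []) j "" == "." then acc2 ++ [(i, j)]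
            else acc2) acc) ([] : List (Int × Int))
    = (PySem.List.enumerate map 0).flatMap (fun ir =>
        ((PySem.List.enumerate ir.2 0).filter (fun jc => jc.2 == ".")).map
          (fun jc => (ir.1, jc.1))) := by
  have h1 : ∀ (i : Int) (acc : List (Int × Int)),
      (PySem.List.pyRange 0 ((PySem.List.pyGetD map i []).length : Int) 1).foldl
        (fun acc2 j =>
          if PySem.List.pyGetD (PySem.List.pyGetD map i []) j "" == "." then acc2 ++ [(i, j)]
          else acc2) acc
      = acc ++ ((PySem.List.enumerate (PySem.List.pyGetD map i []) 0).filter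
          (fun jc => jc.2 == ".")).map (fun jc => (i, jc.1)) := by
    intro i acc
    rw [PySem.List.enumerate_eq_map_pyRange (PySem.List.pyGetD map i []) ""]
    rw [← PySem.List.foldl_append_if (fun jc : Int × String => jc.2 == ".")
          (fun jc : Int × String => (i, jc.1))]
    rw [List.foldl_map]
    simp [PySem.List.len]
  simp only [h1]
  rw [PySem.List.foldl_append_eq_flatMap]
  rw [PySem.List.enumerate_eq_map_pyRange map ([] : List String)]
  rw [List.flatMap_map]
  simp [PySem.List.len]

-- folding A's strict-improvement update is folding min over the distances
theorem foldl_step_eq_min (p : Int × Int) (l : List (Int × Int)) : ∀ (v : Int),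
    l.foldl (fun value points =>
        let dist := |points.1 - p.1| + |points.2 - p.2|
        if dist < value then dist else value) v
    = (l.map (fun pt => |pt.1 - p.1| + |pt.2 - p.2|)).foldl min v := by
  induction l with
  | nil => intro v; simp
  | cons h t ih =>
      intro v
      simp only [List.foldl_cons, List.map_cons, ih]
      congr 1
      rcases lt_or_ge (|h.1 - p.1| + |h.2 - p.2|) v with hlt | hge
      · simp only [if_pos hlt]; omega
      · simp only [if_neg (not_lt.mpr hge)]; omega

-- folding min with a lower bound leaves the accumulator unchanged
theorem foldl_min_of_le (l : List Int) : ∀ (b : Int), (∀ x ∈ l, b ≤ x) → l.foldl min b = b := by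
  induction l with
  | nil => intro b _; rfl
  | cons h t ih =>
      intro b hb
      simp only [List.foldl_cons]
      have h1 : min b h = b := min_eq_left (hb h (by simp))
      rw [h1]; exact ih b (fun x hx => hb x (by simp [hx]))

-- B's inner step in min form (the let/if update is a min)
theorem step_eta (p : Int × Int) (i : Int) :
    (fun (t : Int × Bool) (jc : Int × String) =>
      if jc.2 == "." then
        let d := |i - p.1| + |jc.1 - p.2|
        (if d < t.1 then d else t.1, true)
      else t)
    = (fun (t : Int × Bool) (jc : Int × String) =>
        if jc.2 == "." then (min t.1 (|i - p.1| + |jc.1 - p.2|), true) else t) := by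
  funext t jc
  by_cases hj : (jc.2 == ".") = true
  · rw [if_pos hj, if_pos hj]
    show ((if |i - p.1| + |jc.1 - p.2| < t.1 then |i - p.1| + |jc.1 - p.2| else t.1 : Int),
        (true : Bool)) = _
    have h1 : (if |i - p.1| + |jc.1 - p.2| < t.1 then |i - p.1| + |jc.1 - p.2| else t.1)
        = min t.1 (|i - p.1| + |jc.1 - p.2|) := by
      rw [min_def]; split_ifs <;> omega
    rw [h1]
  · rw [if_neg hj, if_neg hj]

-- B's outer step in the same min form
theorem outerstep_eta (p : Int × Int) :
    (fun (s : Int × Bool) (ir : Int × List String) =>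
      if |ir.1 - p.1| ≥ s.1 then
        (s.1, s.2 || ir.2.contains ".")
      else
        (PySem.List.enumerate ir.2 0).foldl
          (fun t jc =>
            if jc.2 == "." then
              let d := |ir.1 - p.1| + |jc.1 - p.2|
              (if d < t.1 then d else t.1, true)
            else t) s)
    = (fun (s : Int × Bool) (ir : Int × List String) =>
        if |ir.1 - p.1| ≥ s.1 then
          (s.1, s.2 || ir.2.contains ".")
        else
          (PySem.List.enumerate ir.2 0).foldl
            (fun t jc =>
              if jc.2 == "." then (min t.1 (|ir.1 - p.1| + |jc.1 - p.2|), true) else t) s) := by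
  funext s ir
  rw [step_eta p ir.1]

-- B's inner row loop: running min over the row's food distances, found ||= '.' in row
theorem inner_fold_eq (p : Int × Int) (i : Int) (row : List String) : ∀ (k b : Int) (f : Bool),
    (PySem.List.enumerate row k).foldl
      (fun (t : Int × Bool) (jc : Int × String) =>
        if jc.2 == "." then (min t.1 (|i - p.1| + |jc.1 - p.2|), true) else t) (b, f)
    = ((((PySem.List.enumerate row k).filter (fun jc => jc.2 == ".")).map
          (fun jc => |i - p.1| + |jc.1 - p.2|)).foldl min b,
       f || decide (("." : String) ∈ row)) := by
  induction row with
  | nil => intro k b f; simp [PySem.List.enumerate_nil]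
  | cons x xs ih =>
      intro k b f
      rw [PySem.List.enumerate_cons, List.foldl_cons]
      by_cases hx : x = "."
      · subst hx
        rw [if_pos (by simp : ((((k, ("." : String)) : Int × String).2 == ".") = true))]
        rw [ih, List.filter_cons_of_pos (by simp), List.map_cons, List.foldl_cons]
        simp
      · have hsx : ¬ (("." : String) = x) := Ne.symm hx
        rw [if_neg (by simp [hx] : ¬ ((((k, x) : Int × String).2 == ".") = true))]
        rw [ih, List.filter_cons_of_neg (by simp [hx])]
        simp [hsx]

-- B's outer loop: equals the plain min over all food distances, pruned rows contributing nothing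
theorem outer_fold_eq (p : Int × Int) (l : List (Int × List String)) : ∀ (b : Int) (f : Bool),
    l.foldl
      (fun (s : Int × Bool) (ir : Int × List String) =>
        if |ir.1 - p.1| ≥ s.1 then
          (s.1, s.2 || ir.2.contains ".")
        else
          (PySem.List.enumerate ir.2 0).foldl
            (fun t jc =>
              if jc.2 == "." then (min t.1 (|ir.1 - p.1| + |jc.1 - p.2|), true) else t) s) (b, f)
    = ((l.flatMap (fun ir =>
          (((PySem.List.enumerate ir.2 0).filter (fun jc => jc.2 == ".")).map
            (fun jc => |ir.1 - p.1| + |jc.1 - p.2|)))).foldl min b,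
       f || l.any (fun ir => decide (("." : String) ∈ ir.2))) := by
  induction l with
  | nil => intro b f; simp
  | cons ir t ih =>
      intro b f
      rw [List.foldl_cons, List.flatMap_cons, List.any_cons, List.foldl_append]
      by_cases hskip : |ir.1 - p.1| ≥ b
      · rw [if_pos (show |ir.1 - p.1| ≥ ((b, f) : Int × Bool).1 from hskip)]
        rw [ih]
        have hz : (((PySem.List.enumerate ir.2 0).filter (fun jc => jc.2 == ".")).map
            (fun jc => |ir.1 - p.1| + |jc.1 - p.2|)).foldl min b = b := by
          apply foldl_min_of_le
          intro x hx
          simp only [List.mem_map] at hx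
          obtain ⟨jc, _, rfl⟩ := hx
          have := abs_nonneg (jc.1 - p.2)
          omega
        rw [hz]
        simp [Bool.or_assoc]
      · rw [if_neg (show ¬ (|ir.1 - p.1| ≥ ((b, f) : Int × Bool).1) from hskip)]
        rw [inner_fold_eq, ih]
        simp [Bool.or_assoc]

-- row contains '.' iff its filtered enumeration is nonempty
theorem contains_iff_filter (row : List String) : ∀ (k : Int),
    decide (("." : String) ∈ row)
      = !((PySem.List.enumerate row k).filter (fun jc => jc.2 == ".")).isEmpty := by
  induction row with
  | nil => intro k; simp [PySem.List.enumerate_nil]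
  | cons x xs ih =>
      intro k
      rw [PySem.List.enumerate_cons]
      simp only [List.filter_cons]
      by_cases hx : x = "."
      · subst hx; simp
      · have hxb : (x == ".") = false := by simp [hx]
        have hsx : ¬ (("." : String) = x) := Ne.symm hx
        rw [if_neg (by simp [hx])]
        rw [← ih (k + 1)]
        simp [hsx]

-- ===== VERDICT (by name: the statement is the Claim_ definition above) =====
theorem check_nearest_food_position_spec : Claim_equal_check_nearest_food_position := by
  intro map p _
  unfold Spec_check_nearest_food_position
  simp only [check_nearest_food_position, check_nearest_food_position_alt]
  rw [outerstep_eta p, foods_eq, outer_fold_eq]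
  have hdists : (PySem.List.enumerate map 0).flatMap (fun ir =>
        (((PySem.List.enumerate ir.2 0).filter (fun jc => jc.2 == ".")).map
          (fun jc => |ir.1 - p.1| + |jc.1 - p.2|)))
      = ((PySem.List.enumerate map 0).flatMap (fun ir =>
          ((PySem.List.enumerate ir.2 0).filter (fun jc => jc.2 == ".")).map
            (fun jc => (ir.1, jc.1)))).map (fun pt => |pt.1 - p.1| + |pt.2 - p.2|) := by
    rw [List.map_flatMap]
    simp [Function.comp_def]
  have hfound : (PySem.List.enumerate map 0).any (fun ir => decide (("." : String) ∈ ir.2))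
      = !((PySem.List.enumerate map 0).flatMap (fun ir =>
          ((PySem.List.enumerate ir.2 0).filter (fun jc => jc.2 == ".")).map
            (fun jc => (ir.1, jc.1)))).isEmpty := by
    by_cases hE : (PySem.List.enumerate map 0).flatMap (fun ir =>
        ((PySem.List.enumerate ir.2 0).filter (fun jc => jc.2 == ".")).map
          (fun jc => (ir.1, jc.1))) = []
    · rw [hE]
      simp only [List.isEmpty_nil, Bool.not_true]
      apply List.any_eq_false.mpr
      intro ir hir
      rw [List.flatMap_eq_nil_iff] at hE
      have h2 := hE _ hir
      simp only [List.map_eq_nil_iff] at h2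
      rw [contains_iff_filter ir.2 0]
      simp [h2]
    · have h1 : ((PySem.List.enumerate map 0).flatMap (fun ir =>
          ((PySem.List.enumerate ir.2 0).filter (fun jc => jc.2 == ".")).map
            (fun jc => (ir.1, jc.1)))).isEmpty = false := by
        simpa [List.isEmpty_iff] using hE
      rw [h1]
      simp only [Bool.not_false]
      apply List.any_eq_true.mpr
      rw [List.flatMap_eq_nil_iff] at hE
      push Not at hE
      obtain ⟨ir, hir, hne⟩ := hE
      refine ⟨ir, hir, ?_⟩
      have hne2 : (PySem.List.enumerate ir.2 0).filter (fun jc => jc.2 == ".") ≠ [] :=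
        fun h => hne (by rw [h]; rfl)
      rw [contains_iff_filter ir.2 0]
      simp [hne2]
  rw [hdists, hfound, Bool.false_or]
  cases hf : (PySem.List.enumerate map 0).flatMap (fun ir =>
      ((PySem.List.enumerate ir.2 0).filter (fun jc => jc.2 == ".")).map
        (fun jc => (ir.1, jc.1))) with
  | nil => simp
  | cons h t =>
      rw [if_neg (by simp)]
      rw [foldl_step_eq_min]
      simp
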